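-- pv_equiv track=rewrite | github.com/dlnp2/DeepSequence | examples/run_prediction_preprocess.py | update_variant
-- ===== SOURCE A (Python) =====
-- def update_variant(seq, wt_seq, variant, deleted_cols):
--     # We assume single mutants
--     wt_aa = variant[0]
--     mt_aa = variant[-1]
--     _seq = "".join([aa for _pos, aa in enumerate(list(seq)) if _pos not in deleted_cols])
--     _wt_seq = "".join([aa for _pos, aa in enumerate(list(wt_seq)) if _pos not in deleted_cols])
--     mutated_pos = -1
--     for pos, (_mt_aa, _wt_aa) in enumerate(zip(_seq, _wt_seq)):
--         if _mt_aa != _wt_aa: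
--             mutated_pos = pos
--     if mutated_pos == -1:
--         return None, None
--     else:
--         return wt_aa + str(mutated_pos + 1) + mt_aa, _seq
-- ===== SOURCE B (Python) =====
-- def update_variant(seq, wt_seq, variant, deleted_cols):
--     # Single pass over seq: build the filtered sequence and track the last
--     # mismatch against wt_seq at the same (surviving) positions, counting
--     # the filtered index k only while wt_seq still has a character there
--     # (this reproduces zip's truncation at the shorter filtered string).
--     dels = set(deleted_cols)
--     chars = []
--     mutated_pos = None
--     k = 0
--     n_wt = len(wt_seq)
--     for pos, aa in enumerate(seq):
--         if pos in dels:
--             continue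
--         chars.append(aa)
--         if pos < n_wt:
--             if aa != wt_seq[pos]:
--                 mutated_pos = k
--             k += 1
--     if mutated_pos is None:
--         return None, None
--     return variant[0] + str(mutated_pos + 1) + variant[-1], "".join(chars)
-- ===== Notes on version B (the rewrite author's own statement) =====
-- stated objective: alternative
-- what changed: B replaces A's two filtering comprehensions plus a zip-enumerate scan by a single pass over seq that simultaneously builds the filtered sequence and tracks the last mismatch against wt_seq at the corresponding surviving positions, with deleted_cols turned into a set once.
import Mathlib
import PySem

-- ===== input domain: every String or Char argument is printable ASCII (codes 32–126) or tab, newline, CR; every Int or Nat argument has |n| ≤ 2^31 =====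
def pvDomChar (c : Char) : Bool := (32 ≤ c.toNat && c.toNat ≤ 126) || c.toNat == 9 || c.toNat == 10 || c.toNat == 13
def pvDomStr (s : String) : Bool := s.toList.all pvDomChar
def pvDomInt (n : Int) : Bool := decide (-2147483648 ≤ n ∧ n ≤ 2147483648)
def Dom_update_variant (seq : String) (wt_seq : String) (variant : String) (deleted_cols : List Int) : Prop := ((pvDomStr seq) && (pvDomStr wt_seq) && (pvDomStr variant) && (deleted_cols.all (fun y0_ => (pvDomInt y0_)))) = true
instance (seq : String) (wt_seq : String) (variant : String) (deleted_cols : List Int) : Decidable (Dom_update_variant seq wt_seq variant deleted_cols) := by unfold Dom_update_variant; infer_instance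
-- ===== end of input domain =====

-- B is a single pass over seq (filtered set membership, last mismatch tracked on the fly)
-- instead of A's two filtering comprehensions plus a zip-enumerate scan; equal return value on Pre_.

-- ===== PORT A =====
def update_variant (seq : String) (wt_seq : String) (variant : String) (deleted_cols : List Int) : Option String × Option String :=
  match PySem.Str.pyGet? variant 0, PySem.Str.pyGet? variant (-1) with
  | some wt_aa, some mt_aa =>
    -- _seq / _wt_seq: the two list comprehensions over enumerate(...)
    let s := ((PySem.List.enumerate seq.toList).filter (fun p => !(deleted_cols.contains p.1))).map (·.2)
    let w := ((PySem.List.enumerate wt_seq.toList).filter (fun p => !(deleted_cols.contains p.1))).map (·.2)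
    -- for pos, (_mt_aa, _wt_aa) in enumerate(zip(_seq, _wt_seq)) ...
    let m := (PySem.List.enumerate (s.zip w)).foldl
      (fun acc p => if p.2.1 ≠ p.2.2 then p.1 else acc) (-1 : Int)
    if m = -1 then (none, none)
    else (some (String.ofList ([wt_aa] ++ PySem.Int.toChars (m + 1) ++ [mt_aa])), some (String.ofList s))
  | _, _ => (none, none)   -- variant = "": Python raises IndexError; excluded by Pre_

-- ===== PORT B =====
-- the loop body of Source B; state = (chars, muated_pos, k)
def pvBStep (dels : PySem.Set Int) (wtl : List Char) (st : List Char × Option Int × Int)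
    (p : Int × Char) : List Char × Option Int × Int :=
  if PySem.Set.contains dels p.1 then st
  else
    let chars := st.1 ++ [p.2]
    if p.1 < (wtl.length : Int) then
      -- wt_seq[pos]: 0 ≤ pos < len(wt_seq) here, so getD is exact
      (chars, (if p.2 ≠ wtl.getD p.1.toNat ' ' then some st.2.2 else st.2.1), st.2.2 + 1)
    else (chars, st.2.1, st.2.2)

def update_variant_alt (seq : String) (wt_seq : String) (variant : String) (deleted_cols : List Int) : Option String × Option String :=
  let dels : PySem.Set Int := PySem.Set.ofList deleted_cols
  let wtl := wt_seq.toList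
  let st := (PySem.List.enumerate seq.toList).foldl (pvBStep dels wtl) ([], none, 0)
  match st.2.1 with
  | none => (none, none)
  | some m =>
    match PySem.Str.pyGet? variant 0 with
    | none => (none, none)   -- unreachable under Pre_
    | some wt_aa =>
      match PySem.Str.pyGet? variant (-1) with
      | none => (none, none)   -- unreachable under Pre_
      | some mt_aa =>
        (some (String.ofList ([wt_aa] ++ PySem.Int.toChars (m + 1) ++ [mt_aa])), some (String.ofList st.1))

-- ===== PRECONDITION & SPEC =====
-- A evaluates variant[0] unconditionally and raises IndexError on variant = ""; Pre_ excludes exactly that.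
def Pre_update_variant (seq : String) (wt_seq : String) (variant : String) (deleted_cols : List Int) : Prop :=
  variant ≠ ""
instance (seq : String) (wt_seq : String) (variant : String) (deleted_cols : List Int) : Decidable (Pre_update_variant seq wt_seq variant deleted_cols) := by unfold Pre_update_variant; infer_instance

def pvWitness_update_variant : String × String × String × List Int := ("ABCD", "ABBD", "B3C", [0])

def Spec_update_variant (seq : String) (wt_seq : String) (variant : String) (deleted_cols : List Int) (out : Option String × Option String) : Prop := out = update_variant_alt seq wt_seq variant deleted_cols
instance (seq : String) (wt_seq : String) (variant : String) (deleted_cols : List Int) (out : Option String × Option String) : Decidable (Spec_update_variant seq wt_seq variant deleted_cols out) := by unfold Spec_update_variant; infer_instance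

-- ===== CLAIM (what is proved, stated in full; the proofs are below) =====
def Claim_equal_update_variant : Prop := ∀ (seq : String) (wt_seq : String) (variant : String) (deleted_cols : List Int), Dom_update_variant seq wt_seq variant deleted_cols → Pre_update_variant seq wt_seq variant deleted_cols → Spec_update_variant seq wt_seq variant deleted_cols (update_variant seq wt_seq variant deleted_cols)

-- ===== LEMMAS AND PROOFS =====

-- the filtered subsequence: elements of l at positions (from n) not listed in del
def pvFilt {α : Type} (del : List Int) : Int → List α → List α
  | _, [] => []
  | n, a :: s => if del.contains n then pvFilt del (n+1) s else a :: pvFilt del (n+1) s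

theorem pvFilt_eq_enum (del : List Int) (s : List Char) : ∀ n : Int,
    (((PySem.List.enumerate s n).filter (fun p => !(del.contains p.1))).map (·.2)) = pvFilt del n s := by
  induction s with
  | nil => intro n; simp [pvFilt, PySem.List.enumerate_nil]
  | cons a s ih =>
    intro n
    have ih' : ∀ m : Int,
        (List.map (fun x => x.2) (List.filter (fun p => !decide (p.1 ∈ del)) (PySem.List.enumerate s m))) = pvFilt del m s := by
      intro m
      have := ih m
      simpa using this
    simp only [PySem.List.enumerate_cons, List.filter_cons, pvFilt]
    by_cases h : n ∈ del
    · simp [h, ih']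
    · simp [h, ih']

theorem pvFilt_zip (del : List Int) : ∀ (s w : List Char) (n : Int),
    (pvFilt del n s).zip (pvFilt del n w) = pvFilt del n (s.zip w) := by
  intro s
  induction s with
  | nil => intro w n; simp [pvFilt]
  | cons a s ih =>
    intro w n
    cases w with
    | nil =>
      simp [pvFilt, List.zip_nil_right]
    | cons b w =>
      simp only [pvFilt, List.zip_cons_cons]
      by_cases h : n ∈ del
      · simp [h, ih]
      · simp [h, ih, List.zip_cons_cons]

-- last-mismatch scan over the surviving aligned pairs
def pvLastM : Option Int → Int → List (Char × Char) → Option Int × Int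
  | mu, k, [] => (mu, k)
  | mu, k, (a, b) :: ps => pvLastM (if a ≠ b then some k else mu) (k+1) ps

theorem pvSet_contains (del : List Int) (x : Int) :
    PySem.Set.contains (PySem.Set.ofList del) x = del.contains x := by
  simp [PySem.Set.contains_eq_listContains, PySem.Set.mem_ofList]

-- B's fold, characterised: builds pvFilt, and runs pvLastM on the surviving aligned pairs
theorem pvB_fold (del : List Int) (wtl : List Char) : ∀ (s : List Char) (n : Int), 0 ≤ n →
    ∀ (c : List Char) (mu : Option Int) (k : Int),
    (PySem.List.enumerate s n).foldl (pvBStep (PySem.Set.ofList del) wtl) (c, mu, k)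
      = (c ++ pvFilt del n s,
         pvLastM mu k (pvFilt del n (s.zip (wtl.drop n.toNat)))) := by
  intro s
  induction s with
  | nil => intro n hn c mu k; simp [PySem.List.enumerate_nil, pvFilt, pvLastM]
  | cons a s ih =>
    intro n hn c mu k
    simp only [PySem.List.enumerate_cons, List.foldl_cons]
    have hstep : ∀ st, pvBStep (PySem.Set.ofList del) wtl st (n, a) =
        if del.contains n then st
        else if n < (wtl.length : Int) then
          (st.1 ++ [a], (if a ≠ wtl.getD n.toNat ' ' then some st.2.2 else st.2.1), st.2.2 + 1)
        else (st.1 ++ [a], st.2.1, st.2.2) := by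
      intro st; simp only [pvBStep, pvSet_contains]
    by_cases hd : n ∈ del
    · -- position deleted: both zip-lists filter it away
      rw [hstep]
      have hdc : del.contains n = true := by simpa using hd
      rw [if_pos hdc]
      rw [ih (n+1) (by omega) c mu k]
      by_cases hw : n.toNat < wtl.length
      · have hdrop : wtl.drop n.toNat = wtl[n.toNat] :: wtl.drop (n.toNat + 1) :=
          List.drop_eq_getElem_cons hw
        have hn1 : (n+1).toNat = n.toNat + 1 := by omega
        rw [hn1, hdrop, List.zip_cons_cons]
        simp only [pvFilt, hdc, if_true]
      · have hdrop : wtl.drop n.toNat = [] := List.drop_eq_nil_of_le (by omega)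
        have hdrop1 : wtl.drop (n+1).toNat = [] := List.drop_eq_nil_of_le (by omega)
        rw [hdrop, hdrop1]
        simp only [pvFilt, hdc, if_true, List.zip_nil_right, pvLastM]
    · rw [hstep]
      have hdc : del.contains n = false := by simpa using hd
      simp only [hdc, Bool.false_eq_true, if_false]
      by_cases hw : n.toNat < wtl.length
      · have hwi : n < (wtl.length : Int) := by omega
        have hdrop : wtl.drop n.toNat = wtl[n.toNat] :: wtl.drop (n.toNat + 1) :=
          List.drop_eq_getElem_cons hw
        have hn1 : (n+1).toNat = n.toNat + 1 := by omega
        have hget : wtl.getD n.toNat ' ' = wtl[n.toNat] := List.getD_eq_getElem wtl ' ' hw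
        rw [if_pos hwi]
        rw [ih (n+1) (by omega) (c ++ [a]) _ _, hn1, hdrop, List.zip_cons_cons, hget]
        simp only [pvFilt, hdc, Bool.false_eq_true, if_false, pvLastM,
                   List.append_assoc, List.singleton_append]
      · have hwi : ¬ n < (wtl.length : Int) := by omega
        have hdrop : wtl.drop n.toNat = [] := List.drop_eq_nil_of_le (by omega)
        have hdrop1 : wtl.drop (n+1).toNat = [] := List.drop_eq_nil_of_le (by omega)
        rw [if_neg hwi]
        rw [ih (n+1) (by omega) (c ++ [a]) mu k, hdrop, hdrop1]
        simp only [pvFilt, hdc, Bool.false_eq_true, if_false, List.zip_nil_right, pvLastM,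
                   List.append_assoc, List.singleton_append]

def pvUnopt : Option Int → Int
  | none => -1
  | some k => k

-- A's last-mismatch fold (int sentinel) agrees with pvLastM (option), indices stay ≥ 0
theorem pvA_fold : ∀ (ps : List (Char × Char)) (j : Int) (mu : Option Int), 0 ≤ j →
    (∀ k, mu = some k → 0 ≤ k) →
    (PySem.List.enumerate ps j).foldl (fun acc p => if p.2.1 ≠ p.2.2 then p.1 else acc) (pvUnopt mu)
      = pvUnopt (pvLastM mu j ps).1
    ∧ (∀ k, (pvLastM mu j ps).1 = some k → 0 ≤ k) := by
  intro ps
  induction ps with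
  | nil =>
    intro j mu hj hm
    refine ⟨?_, ?_⟩
    · simp [PySem.List.enumerate_nil, pvLastM]
    · simpa [pvLastM] using hm
  | cons p ps ih =>
    intro j mu hj hm
    obtain ⟨a, b⟩ := p
    simp only [PySem.List.enumerate_cons, List.foldl_cons, pvLastM]
    by_cases hab : a ≠ b
    · have : (if a ≠ b then j else pvUnopt mu) = pvUnopt (some j) := by simp [hab, pvUnopt]
      rw [this]
      have := ih (j+1) (some j) (by omega) (by intro k hk; cases hk; omega)
      simpa [hab] using this
    · have : (if a ≠ b then j else pvUnopt mu) = pvUnopt mu := by simp [hab]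
      rw [this]
      have := ih (j+1) mu (by omega) hm
      simpa [hab] using this

theorem update_variant_spec : Claim_equal_update_variant := by
  intro seq wt_seq variant deleted_cols _hdom hpre
  unfold Spec_update_variant
  unfold update_variant update_variant_alt
  -- variant ≠ "" makes both pyGet? some
  have hvl : variant.toList ≠ [] := by
    intro h
    apply hpre
    have := congrArg String.ofList h
    simpa using this
  obtain ⟨v0, vrest, hv⟩ : ∃ c cs, variant.toList = c :: cs := by
    cases hvt : variant.toList with
    | nil => exact absurd hvt hvl
    | cons c cs => exact ⟨c, cs, rfl⟩
  have hg0 : ∃ c, PySem.Str.pyGet? variant 0 = some c := by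
    refine ⟨v0, ?_⟩
    have : PySem.Str.pyGet? variant ((0 : Nat) : Int) = variant.toList[(0 : Nat)]? :=
      PySem.Str.pyGet?_natCast ..
    simpa [hv] using this
  have hg1 : ∃ c, PySem.Str.pyGet? variant (-1) = some c := by
    have hlast : PySem.Str.pyGet? variant (-1) = variant.toList.getLast? := by
      simp [PySem.Str.pyGet?, PySem.List.pyGet?_neg_one]
    rw [hlast, hv]
    cases hres : (v0 :: vrest).getLast? with
    | none => exact absurd (List.getLast?_eq_none_iff.1 hres) (by simp)
    | some c => exact ⟨c, rfl⟩
  obtain ⟨wa, hwa⟩ := hg0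
  obtain ⟨ma, hma⟩ := hg1
  rw [hwa, hma]
  -- characterise B's fold and A's ingredients
  have hB := pvB_fold deleted_cols wt_seq.toList seq.toList 0 le_rfl [] none 0
  simp only [Int.toNat_zero, List.drop_zero] at hB
  have hA := pvA_fold (pvFilt deleted_cols 0 (seq.toList.zip wt_seq.toList)) 0 none le_rfl
    (by intro k hk; cases hk)
  have hA1 : (PySem.List.enumerate (pvFilt deleted_cols 0 (seq.toList.zip wt_seq.toList)) 0).foldl
      (fun acc p => if p.2.1 ≠ p.2.2 then p.1 else acc) (-1)
      = pvUnopt (pvLastM none 0 (pvFilt deleted_cols 0 (seq.toList.zip wt_seq.toList))).1 := hA.1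
  have hA2 := hA.2
  simp only [hB, pvFilt_eq_enum, pvFilt_zip, List.nil_append, hA1]
  cases hres : (pvLastM none 0 (pvFilt deleted_cols 0 (seq.toList.zip wt_seq.toList))).1 with
  | none => simp [pvUnopt]
  | some m =>
    have hm : 0 ≤ m := hA2 m hres
    simp [pvUnopt]
    omega
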